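-- pv_equiv track=rewrite | github.com/CyberSully/Continuous-Integration- | task.py | conv_endian
-- ===== SOURCE A (Python) =====
-- def conv_endian(num, endian='big'):
--     """Converts an integer to hexadecimal with specified endian type."""
--     if endian not in ['big', 'little']:
--         return None
--
--     if num < 0:
--         negative = True
--         # adds "-" for negative numbers on line 25 and
--         # make sure variables keeps absolute value
--         num = abs(num)
--     else:
--         negative = False
--
--     result = []
--     while num > 0:
--         least_s_byte = num % 256  # Extract the least significant byte
--         result.append(format(least_s_byte, '02X'))
--         num //= 256       # Shift right by 8 bits
--
--     if endian == 'big':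
--         result.reverse()
--
--     if negative:
--         return '-' + ' '.join(result)
--     else:
--         return ' '.join(result) if result else '00'
-- ===== SOURCE B (Python) =====
-- def conv_endian(num, endian='big'):
--     """Converts an integer to hexadecimal with specified endian type."""
--     if endian not in ('big', 'little'):
--         return None
--     sign = '-' if num < 0 else ''
--     h = format(abs(num), 'X')
--     if len(h) % 2:
--         h = '0' + h
--     chunks = [h[i:i + 2] for i in range(0, len(h), 2)]
--     if endian == 'little':
--         chunks.reverse()
--     return sign + ' '.join(chunks)
-- ===== Notes on version B (the rewrite author's own statement) =====
-- stated objective: simpler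
-- what changed: Replaces A's least-significant-byte extraction loop (num % 256, num //= 256, per-byte '02X' formatting, conditional reverse) by formatting abs(num) in hex once, zero-padding to even length and chunking the string into two-character bytes, which gives the big-endian list directly; the zero case falls out of the format ('0' pads to '00') with no sentinel.
import Mathlib
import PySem

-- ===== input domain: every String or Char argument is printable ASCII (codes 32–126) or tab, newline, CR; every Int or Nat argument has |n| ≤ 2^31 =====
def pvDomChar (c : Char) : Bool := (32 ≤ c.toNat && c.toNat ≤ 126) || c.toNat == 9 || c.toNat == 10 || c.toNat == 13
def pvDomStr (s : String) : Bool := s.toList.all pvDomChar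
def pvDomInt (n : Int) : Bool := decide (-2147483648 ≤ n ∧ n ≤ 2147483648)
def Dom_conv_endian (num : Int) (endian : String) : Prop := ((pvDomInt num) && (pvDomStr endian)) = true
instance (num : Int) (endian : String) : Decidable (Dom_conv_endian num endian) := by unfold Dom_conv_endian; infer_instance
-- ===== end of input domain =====

-- B replaces A's byte-extraction loop (num % 256 / num //= 256) by formatting abs(num) in hex once,
-- zero-padding to even length and chunking the string into two-character bytes (objective: simpler).

-- ===== PORT A =====

-- uppercase hex digit for 0 ≤ n < 16 (the digits 'format' produces)
def hexDig (n : Nat) : Char := if n < 10 then Char.ofNat (48 + n) else Char.ofNat (55 + n)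

-- format(b, '02X') for 0 ≤ b < 256
def byteHex (b : Nat) : String := String.mk [hexDig (b / 16), hexDig (b % 16)]

-- the while-loop of A: collects format(num % 256, '02X'), num //= 256, in append order
def loopA : Nat → List String
  | 0 => []
  | n+1 => byteHex ((n+1) % 256) :: loopA ((n+1) / 256)
decreasing_by exact Nat.div_lt_self (Nat.succ_pos n) (by norm_num)

def conv_endian (num : Int) (endian : String) : Option String :=
  if ¬ (endian = "big" ∨ endian = "little") then none
  else
    let negative := num < 0
    let n := num.natAbs          -- num = abs(num) in the negative branch; num ≥ 0 unchanged
    let result := loopA n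
    let result := if endian = "big" then result.reverse else result
    if negative then some ("-" ++ PySem.Str.join " " result)
    else some (if result.isEmpty then "00" else PySem.Str.join " " result)

-- ===== PORT B =====

-- format(n, 'X') for n > 0: digits accumulated most-significant first
def hexCore : Nat → List Char → List Char
  | 0, acc => acc
  | n+1, acc => hexCore ((n+1) / 16) (hexDig ((n+1) % 16) :: acc)
decreasing_by exact Nat.div_lt_self (Nat.succ_pos n) (by norm_num)

-- format(n, 'X')
def toHexChars (n : Nat) : List Char := if n = 0 then ['0'] else hexCore n []

-- h = '0' + h when len(h) is odd
def padEven (l : List Char) : List Char := if l.length % 2 = 1 then '0' :: l else l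

-- [h[i:i+2] for i in range(0, len(h), 2)]
def chunk2 : List Char → List String
  | a :: b :: rest => String.mk [a, b] :: chunk2 rest
  | [a] => [String.mk [a]]
  | [] => []

def conv_endian_alt (num : Int) (endian : String) : Option String :=
  if ¬ (endian = "big" ∨ endian = "little") then none
  else
    let sign := if num < 0 then "-" else ""
    let h := padEven (toHexChars num.natAbs)
    let chunks := chunk2 h
    let chunks := if endian = "little" then chunks.reverse else chunks
    some (sign ++ PySem.Str.join " " chunks)

-- ===== PRECONDITION & SPEC =====
def Spec_conv_endian (num : Int) (endian : String) (out : Option String) : Prop := out = conv_endian_alt num endian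
instance (num : Int) (endian : String) (out : Option String) : Decidable (Spec_conv_endian num endian out) := by unfold Spec_conv_endian; infer_instance

-- ===== CLAIM (what is proved, stated in full; the proofs are below) =====
def Claim_equal_conv_endian : Prop := ∀ (num : Int) (endian : String), Dom_conv_endian num endian → Spec_conv_endian num endian (conv_endian num endian)

-- ===== LEMMAS AND PROOFS =====

theorem hexCore_acc (n : Nat) : ∀ acc, hexCore n acc = hexCore n [] ++ acc := by
  induction n using Nat.strong_induction_on with
  | _ n ih =>
    intro acc
    match n with
    | 0 => simp [hexCore]
    | m+1 =>
      rw [hexCore, hexCore,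
        ih ((m+1)/16) (Nat.div_lt_self (Nat.succ_pos m) (by norm_num)) (hexDig ((m+1) % 16) :: acc),
        ih ((m+1)/16) (Nat.div_lt_self (Nat.succ_pos m) (by norm_num)) [hexDig ((m+1) % 16)]]
      simp

theorem padEven_even (l : List Char) : (padEven l).length % 2 = 0 := by
  unfold padEven; split_ifs with h
  · simp; omega
  · omega

theorem padEven_append2 (l : List Char) (a b : Char) :
    padEven (l ++ [a, b]) = padEven l ++ [a, b] := by
  unfold padEven
  have : (l ++ [a, b]).length % 2 = l.length % 2 := by simp
  rw [this]; split_ifs <;> simp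

theorem chunk2_append2 (l : List Char) (a b : Char) (h : l.length % 2 = 0) :
    chunk2 (l ++ [a, b]) = chunk2 l ++ [String.mk [a, b]] := by
  induction l using chunk2.induct with
  | case1 x y rest ih =>
    simp at h
    simp only [List.cons_append, chunk2, ih (by omega)]
  | case2 x => simp at h
  | case3 => simp [chunk2]

theorem loopA_pos (n : Nat) (h : 0 < n) :
    loopA n = byteHex (n % 256) :: loopA (n / 256) := by
  match n, h with
  | m+1, _ => rw [loopA]

theorem hexCore_small (n : Nat) (hpos : 0 < n) (h255 : n < 256) :
    hexCore n [] = if n < 16 then [hexDig n] else [hexDig (n / 16), hexDig (n % 16)] := by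
  obtain ⟨m, rfl⟩ : ∃ m, n = m + 1 := ⟨n - 1, by omega⟩
  rw [hexCore, hexCore_acc]
  by_cases h16 : m + 1 < 16
  · have e0 : (m+1)/16 = 0 := by omega
    have e1 : (m+1)%16 = m+1 := by omega
    simp [e0, e1, hexCore, h16]
  · obtain ⟨k, hk⟩ : ∃ k, (m+1)/16 = k + 1 := ⟨(m+1)/16 - 1, by omega⟩
    rw [hk, hexCore, hexCore_acc]
    have e0 : (k+1)/16 = 0 := by omega
    have e2 : (k+1)%16 = (m+1)/16 := by omega
    rw [e0, e2, if_neg h16]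
    simp [hexCore, hk]

-- main bridge: for n > 0, B's chunked padded hex string is A's byte list reversed
theorem chunk_eq_loopA (n : Nat) (hpos : 0 < n) :
    chunk2 (padEven (hexCore n [])) = (loopA n).reverse := by
  induction n using Nat.strong_induction_on with
  | _ n ih =>
    by_cases hbig : 256 ≤ n
    · have h1 : hexCore n [] = hexCore (n / 256) [] ++ [hexDig (n % 256 / 16), hexDig (n % 256 % 16)] := by
        obtain ⟨m, rfl⟩ : ∃ m, n = m + 1 := ⟨n - 1, by omega⟩
        rw [hexCore, hexCore_acc]
        obtain ⟨k, hk⟩ : ∃ k, (m+1)/16 = k + 1 := ⟨(m+1)/16 - 1, by omega⟩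
        rw [hk, hexCore, hexCore_acc]
        have e1 : (k+1)/16 = (m+1)/256 := by omega
        have e2 : (k+1)%16 = (m+1)%256/16 := by omega
        have e3 : (m+1)%16 = (m+1)%256%16 := by omega
        rw [e1, e2, e3, List.append_assoc]
        rfl
      have hq : 0 < n / 256 := Nat.div_pos hbig (by norm_num)
      have hlt : n / 256 < n := Nat.div_lt_self hpos (by norm_num)
      rw [h1, padEven_append2, chunk2_append2 _ _ _ (padEven_even _), ih _ hlt hq,
        loopA_pos n hpos]
      simp [byteHex]
    · have h255 : n < 256 := by omega
      have hx := hexCore_small n hpos h255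
      have hloop : loopA n = [byteHex n] := by
        rw [loopA_pos n hpos]
        have h1 : n % 256 = n := by omega
        have h2 : n / 256 = 0 := by omega
        rw [h1, h2, loopA]
      by_cases h16 : n < 16
      · rw [hx, if_pos h16, hloop]
        have e0 : n / 16 = 0 := by omega
        have e1 : n % 16 = n := by omega
        have hd0 : hexDig 0 = '0' := by decide
        simp [padEven, chunk2, byteHex, e0, e1, hd0]
      · rw [hx, if_neg h16, hloop]
        simp [padEven, chunk2, byteHex]

theorem toHex_chunks (n : Nat) (h : n ≠ 0) :
    chunk2 (padEven (toHexChars n)) = (loopA n).reverse := by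
  rw [toHexChars, if_neg h, chunk_eq_loopA n (Nat.pos_of_ne_zero h)]

-- ===== VERDICT (by name: the statement is the Claim_ definition above) =====
theorem conv_endian_spec : Claim_equal_conv_endian := by
  intro num endian _
  unfold Spec_conv_endian conv_endian conv_endian_alt
  by_cases he : endian = "big" ∨ endian = "little"
  · rw [if_neg (not_not_intro he), if_neg (not_not_intro he)]
    simp only
    by_cases hz : num.natAbs = 0
    · have h0 : num = 0 := by omega
      subst h0
      rcases he with h | h <;> subst h <;>
        simp [loopA, toHexChars, padEven, chunk2] <;> rfl
    · rw [toHex_chunks _ hz]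
      have hcons := loopA_pos num.natAbs (Nat.pos_of_ne_zero hz)
      by_cases hneg : num < 0
      · rw [if_pos hneg, if_pos hneg]
        rcases he with h | h <;> subst h
        · rw [if_pos rfl, if_neg (show ¬("big" : String) = "little" by decide)]
        · rw [if_neg (show ¬("little" : String) = "big" by decide),
            if_pos rfl, List.reverse_reverse]
      · rw [if_neg hneg, if_neg hneg]
        rcases he with h | h <;> subst h
        · rw [if_pos rfl]
          have hne : ((loopA num.natAbs).reverse).isEmpty = false := by
            rw [hcons]; simp
          rw [hne, if_neg (show ¬("big" : String) = "little" by decide)]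
          simp
        · rw [if_neg (show ¬("little" : String) = "big" by decide)]
          have hne : (loopA num.natAbs).isEmpty = false := by
            rw [hcons]; simp
          rw [hne, if_pos rfl, List.reverse_reverse]
          simp
  · rw [if_pos he, if_pos he]
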